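-- pv_equiv track=rewrite | github.com/OM234/Discrete-Math-FSA-Assignment-2 | PA2Part3.py | getNEquivalance
-- ===== SOURCE A (Python) =====
-- def getNEquivalance(equivalenceLists, states, alphabet, transitions, root, acceptingStates):
--     newEquivalanceLists = []
--
--     for equivalenceList in equivalenceLists:
--         for state in equivalenceList:
--             equivalenceFound = False
--             for newEquivalenceList in newEquivalanceLists:
--                 for newState in newEquivalenceList:
--                     if isEquivalent(state, newState, equivalenceLists, transitions, alphabet, acceptingStates):
--                         equivalenceFound = True
--                         newEquivalenceList.append(state)
--                         break
--                     else:
--                         break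
--                 if equivalenceFound:
--                     break
--             if equivalenceFound is False:
--                 newEquivalanceLists.append([state])
--
--     return newEquivalanceLists
--
-- def isEquivalent(state, newState, equivalenceLists, transitions, alphabet, acceptingStates):
--     resultState = []
--     resultNewState = []
--
--     if newState in acceptingStates and state not in acceptingStates:
--         return False
--     if state in acceptingStates and newState not in acceptingStates:
--         return False
--
--     for transition in transitions:
--         for symbol in alphabet:
--             if transition[0] == state and transition[1] == symbol:
--                 resultState.append(transition[2])
--             if transition[0] == newState and transition[1] == symbol:
--                 resultNewState.append(transition[2])
--
--     if resultState == resultNewState: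
--         return True
--
--     for equivalenceList in equivalenceLists:
--         stateInList = False
--         newStateInList = False
--         for state in resultState:
--             if state in equivalenceList:
--                 stateInList = True
--                 break
--         for state in resultNewState:
--             if state in equivalenceList:
--                 newStateInList = True
--                 break
--         if stateInList != newStateInList:
--             return False
--
--     return True
-- ===== SOURCE B (Python) =====
-- def getNEquivalance(equivalenceLists, states, alphabet, transitions, root, acceptingStates):
--     alpha = set(alphabet)
--     acc = set(acceptingStates)
--
--     def sig(s):
--         # canonical signature: acceptance flag + which equivalence class each move can reach
--         return (s in acc,
--                 tuple(any(t[0] == s and t[1] in alpha and t[2] in lst for t in transitions)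
--                       for lst in equivalenceLists))
--
--     groups = {}
--     for lst in equivalenceLists:
--         for s in lst:
--             groups.setdefault(sig(s), []).append(s)
--     return [g for g in groups.values()]
-- ===== Notes on version B (the rewrite author's own statement) =====
-- stated objective: faster
-- what changed: Replaces A's quadratic pairwise isEquivalent comparisons against each existing group's representative by computing a canonical signature (acceptance flag + which equivalence class each in-alphabet transition reaches) once per state and bucketing states by signature in one pass over the states.
-- outside the precondition, e.g. on getNEquivalance([['a']], ['a'], [], [[]], 'a', []): A returns [['a']], B raises IndexError; on getNEquivalance([['a']], ['a'], [], [['a']], 'a', []): A returns [['a']], B raises IndexError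
import Mathlib
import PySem

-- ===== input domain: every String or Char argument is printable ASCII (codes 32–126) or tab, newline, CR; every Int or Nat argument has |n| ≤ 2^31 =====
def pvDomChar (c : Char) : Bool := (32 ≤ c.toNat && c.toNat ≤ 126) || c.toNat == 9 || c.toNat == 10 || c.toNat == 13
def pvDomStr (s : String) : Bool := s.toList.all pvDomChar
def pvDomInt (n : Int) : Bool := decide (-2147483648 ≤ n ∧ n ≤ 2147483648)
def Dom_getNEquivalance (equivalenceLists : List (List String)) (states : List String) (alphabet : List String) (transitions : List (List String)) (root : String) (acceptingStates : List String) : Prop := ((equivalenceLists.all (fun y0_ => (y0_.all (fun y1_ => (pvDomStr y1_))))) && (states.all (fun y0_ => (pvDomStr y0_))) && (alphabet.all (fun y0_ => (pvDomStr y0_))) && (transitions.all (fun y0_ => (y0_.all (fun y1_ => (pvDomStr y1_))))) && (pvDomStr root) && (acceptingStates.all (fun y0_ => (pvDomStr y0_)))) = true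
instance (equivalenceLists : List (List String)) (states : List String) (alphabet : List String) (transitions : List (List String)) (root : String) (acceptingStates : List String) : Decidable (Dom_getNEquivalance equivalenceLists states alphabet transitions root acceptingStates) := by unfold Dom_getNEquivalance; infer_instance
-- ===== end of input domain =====

-- B replaces A's O(S^2) pairwise isEquivalent comparisons by computing one canonical signature
-- per state (acceptance flag + which equivalence class each admissible move reaches) and
-- bucketing states by signature in a single pass; objective: faster.
-- (A mutates nothing observable; the equivalence is about the return value.)

-- ===== PORT A =====
-- literal port of helper isEquivalent; list indexing t[0]/t[1]/t[2] is ported as List.getD,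
-- exact under Pre_ (every transition row has length ≥ 3, so every index is in range)
def isEquivA (state newState : String) (equivalenceLists : List (List String)) (transitions : List (List String)) (alphabet : List String) (acceptingStates : List String) : Bool :=
  if acceptingStates.contains newState && !acceptingStates.contains state then false
  else if acceptingStates.contains state && !acceptingStates.contains newState then false
  else
    let p : List String × List String := transitions.foldl (fun p t =>
      alphabet.foldl (fun p sym =>
        let p1 := if t.getD 0 "" == state && t.getD 1 "" == sym then (p.1 ++ [t.getD 2 ""], p.2) else p
        if t.getD 0 "" == newState && t.getD 1 "" == sym then (p1.1, p1.2 ++ [t.getD 2 ""]) else p1) p) ([], [])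
    if p.1 == p.2 then true
    else equivalenceLists.all (fun l => (p.1.any fun x => l.contains x) == (p.2.any fun x => l.contains x))

-- A's scan of newEquivalanceLists: each group is compared only through its first element
-- (the inner loop breaks after the first iteration either way), appended to on success,
-- and [state] is appended at the end if no group matched
def insertA (ie : String → Bool) (state : String) : List (List String) → List (List String)
  | [] => [[state]]
  | [] :: rest => [] :: insertA ie state rest
  | (r :: g) :: rest => if ie r then (r :: (g ++ [state])) :: rest else (r :: g) :: insertA ie state rest

def getNEquivalance (equivalenceLists : List (List String)) (states : List String) (alphabet : List String) (transitions : List (List String)) (root : String) (acceptingStates : List String) : List (List String) :=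
  equivalenceLists.foldl (fun acc l => l.foldl (fun acc s =>
    insertA (fun r => isEquivA s r equivalenceLists transitions alphabet acceptingStates) s acc) acc) []

-- ===== PORT B =====
-- signature of a state: (s in acc, tuple(any(...) for lst in equivalenceLists)); t[i] as getD, exact under Pre_
def sigB (equivalenceLists : List (List String)) (transitions : List (List String)) (alphabet : List String) (acceptingStates : List String) (s : String) : Bool × List Bool :=
  (acceptingStates.contains s,
   equivalenceLists.map (fun l => transitions.any (fun t =>
     t.getD 0 "" == s && alphabet.contains (t.getD 1 "") && l.contains (t.getD 2 ""))))

-- groups.setdefault(k, []).append(s) on an insertion-ordered dict (association list, first match)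
def bucketB {κ : Type} [BEq κ] (k : κ) (s : String) : List (κ × List String) → List (κ × List String)
  | [] => [(k, [s])]
  | (k', g) :: rest => if k' == k then (k', g ++ [s]) :: rest else (k', g) :: bucketB k s rest

def getNEquivalance_alt (equivalenceLists : List (List String)) (states : List String) (alphabet : List String) (transitions : List (List String)) (root : String) (acceptingStates : List String) : List (List String) :=
  (equivalenceLists.foldl (fun d l => l.foldl (fun d s =>
    bucketB (sigB equivalenceLists transitions alphabet acceptingStates s) s d) d)
    ([] : List ((Bool × List Bool) × List String))).map Prod.snd

-- ===== PRECONDITION & SPEC =====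
-- Pre_ excludes inputs with a transition row too short to be indexed: rows shorter than 3
-- whose entries can be reached by the comparisons (first entry a state of some equivalence
-- list, or length < 2, or second entry in the alphabet); on such rows Python A raises
-- IndexError whenever the row is actually indexed (and B's signature scan likewise raises),
-- while on the runs that happen never to index them A still returns — those inputs are
-- excluded with cites in claim.json.
def Pre_getNEquivalance (equivalenceLists : List (List String)) (states : List String) (alphabet : List String) (transitions : List (List String)) (root : String) (acceptingStates : List String) : Prop :=
  equivalenceLists.flatten = [] ∨
  ∀ t ∈ transitions, 3 ≤ t.length ∨
    (1 ≤ t.length ∧ (t.getD 0 "" ∉ equivalenceLists.flatten ∨ (t.length = 2 ∧ t.getD 1 "" ∉ alphabet)))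
instance (equivalenceLists : List (List String)) (states : List String) (alphabet : List String) (transitions : List (List String)) (root : String) (acceptingStates : List String) : Decidable (Pre_getNEquivalance equivalenceLists states alphabet transitions root acceptingStates) := by unfold Pre_getNEquivalance; infer_instance

def pvWitness_getNEquivalance : List (List String) × List String × List String × List (List String) × String × List String :=
  ([["a", "b"], ["c"]], ["a", "b", "c"], ["0"], [["a", "0", "c"], ["b", "0", "c"], ["c", "0", "c"]], "a", ["c"])

def Spec_getNEquivalance (equivalenceLists : List (List String)) (states : List String) (alphabet : List String) (transitions : List (List String)) (root : String) (acceptingStates : List String) (out : List (List String)) : Prop := out = getNEquivalance_alt equivalenceLists states alphabet transitions root acceptingStates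
instance (equivalenceLists : List (List String)) (states : List String) (alphabet : List String) (transitions : List (List String)) (root : String) (acceptingStates : List String) (out : List (List String)) : Decidable (Spec_getNEquivalance equivalenceLists states alphabet transitions root acceptingStates out) := by unfold Spec_getNEquivalance; infer_instance

-- ===== CLAIM (what is proved, stated in full; the proofs are below) =====
def Claim_equal_getNEquivalance : Prop := ∀ (equivalenceLists : List (List String)) (states : List String) (alphabet : List String) (transitions : List (List String)) (root : String) (acceptingStates : List String), Dom_getNEquivalance equivalenceLists states alphabet transitions root acceptingStates → Pre_getNEquivalance equivalenceLists states alphabet transitions root acceptingStates → Spec_getNEquivalance equivalenceLists states alphabet transitions root acceptingStates (getNEquivalance equivalenceLists states alphabet transitions root acceptingStates)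

-- ===== LEMMAS AND PROOFS =====

-- the pair-building double loop of isEquivA appends independently to both components
theorem pv_foldl_pair {α : Type} (f g : α → List String) (l : List α) (p : List String × List String) :
    l.foldl (fun p a => (p.1 ++ f a, p.2 ++ g a)) p = (p.1 ++ l.flatMap f, p.2 ++ l.flatMap g) := by
  induction l generalizing p with
  | nil => simp
  | cons a l ih => simp [ih, List.append_assoc]

theorem pv_any_and_const {α : Type} (l : List α) (b : Bool) (q : α → Bool) :
    (l.any fun x => b && q x) = (b && l.any q) := by
  cases b <;> simp

theorem pv_all_beq_map {α : Type} (f g : α → Bool) (l : List α) :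
    l.all (fun x => f x == g x) = (l.map f == l.map g) := by
  induction l with
  | nil => rfl
  | cons a l ih => simp [List.cons_beq_cons, ih]

-- resA s = the resultState list Python builds for source state s
def resA (transitions : List (List String)) (alphabet : List String) (s : String) : List String :=
  transitions.flatMap (fun t => alphabet.flatMap (fun sym =>
    if t.getD 0 "" == s && t.getD 1 "" == sym then [t.getD 2 ""] else []))

theorem pv_pair_eq_res (state newState : String) (transitions : List (List String)) (alphabet : List String) :
    (transitions.foldl (fun p t =>
      alphabet.foldl (fun p sym =>
        let p1 := if t.getD 0 "" == state && t.getD 1 "" == sym then (p.1 ++ [t.getD 2 ""], p.2) else p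
        if t.getD 0 "" == newState && t.getD 1 "" == sym then (p1.1, p1.2 ++ [t.getD 2 ""]) else p1) p)
      (([], []) : List String × List String))
    = (resA transitions alphabet state, resA transitions alphabet newState) := by
  have hinner : ∀ (t : List String) (p : List String × List String),
      alphabet.foldl (fun p sym =>
        let p1 := if t.getD 0 "" == state && t.getD 1 "" == sym then (p.1 ++ [t.getD 2 ""], p.2) else p
        if t.getD 0 "" == newState && t.getD 1 "" == sym then (p1.1, p1.2 ++ [t.getD 2 ""]) else p1) p
      = (p.1 ++ alphabet.flatMap (fun sym => if t.getD 0 "" == state && t.getD 1 "" == sym then [t.getD 2 ""] else []),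
         p.2 ++ alphabet.flatMap (fun sym => if t.getD 0 "" == newState && t.getD 1 "" == sym then [t.getD 2 ""] else [])) := by
    intro t p
    have : (fun (p : List String × List String) sym =>
        let p1 := if t.getD 0 "" == state && t.getD 1 "" == sym then (p.1 ++ [t.getD 2 ""], p.2) else p
        if t.getD 0 "" == newState && t.getD 1 "" == sym then (p1.1, p1.2 ++ [t.getD 2 ""]) else p1)
        = (fun p sym => (p.1 ++ (if t.getD 0 "" == state && t.getD 1 "" == sym then [t.getD 2 ""] else []),
                         p.2 ++ (if t.getD 0 "" == newState && t.getD 1 "" == sym then [t.getD 2 ""] else []))) := by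
      funext p sym
      cases h1 : (t.getD 0 "" == state && t.getD 1 "" == sym) <;>
        cases h2 : (t.getD 0 "" == newState && t.getD 1 "" == sym) <;>
        simp [h1, h2]
    rw [this, pv_foldl_pair]
  have : (fun (p : List String × List String) (t : List String) =>
      alphabet.foldl (fun p sym =>
        let p1 := if t.getD 0 "" == state && t.getD 1 "" == sym then (p.1 ++ [t.getD 2 ""], p.2) else p
        if t.getD 0 "" == newState && t.getD 1 "" == sym then (p1.1, p1.2 ++ [t.getD 2 ""]) else p1) p)
      = (fun p t => (p.1 ++ alphabet.flatMap (fun sym => if t.getD 0 "" == state && t.getD 1 "" == sym then [t.getD 2 ""] else []),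
                     p.2 ++ alphabet.flatMap (fun sym => if t.getD 0 "" == newState && t.getD 1 "" == sym then [t.getD 2 ""] else []))) := by
    funext p t; exact hinner t p
  rw [this, pv_foldl_pair]
  simp [resA]

-- membership scans over resA are exactly B's one-pass transition scan
theorem pv_any_resA (transitions : List (List String)) (alphabet : List String) (s : String) (q : String → Bool) :
    (resA transitions alphabet s).any q
      = transitions.any (fun t => t.getD 0 "" == s && alphabet.contains (t.getD 1 "") && q (t.getD 2 "")) := by
  unfold resA
  rw [List.any_flatMap]
  congr 1
  funext t
  rw [List.any_flatMap]
  have : (fun sym => (if t.getD 0 "" == s && t.getD 1 "" == sym then [t.getD 2 ""] else []).any q)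
      = (fun sym => (t.getD 0 "" == s && q (t.getD 2 "")) && (t.getD 1 "" == sym)) := by
    funext sym
    by_cases h : (t.getD 0 "" == s && t.getD 1 "" == sym) = true
    · simp at h
      simp [h, Bool.and_comm]
    · simp only [Bool.not_eq_true] at h
      simp only [h]
      cases h0 : (t.getD 0 "" == s) <;> cases h1 : (t.getD 1 "" == sym) <;> simp_all
  rw [this, pv_any_and_const, List.any_beq]
  cases h0 : (t.getD 0 "" == s) <;> cases hq : q (t.getD 2 "") <;> cases hc : alphabet.contains (t.getD 1 "") <;> simp

theorem pv_prod_beq (a b : Bool) (l m : List Bool) : (((a, l) : Bool × List Bool) == (b, m)) = (a == b && l == m) := rfl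

-- the key characterisation: A's pairwise test is equality of B's signatures
theorem pv_isEquiv_eq_sig (s r : String) (E T : List (List String)) (Al Acc : List String) :
    isEquivA s r E T Al Acc = (sigB E T Al Acc s == sigB E T Al Acc r) := by
  unfold isEquivA sigB
  rw [pv_pair_eq_res]
  simp only [pv_prod_beq]
  have hM : ∀ x : String,
      E.map (fun l => T.any (fun t => t.getD 0 "" == x && Al.contains (t.getD 1 "") && l.contains (t.getD 2 "")))
        = E.map (fun l => (resA T Al x).any fun y => l.contains y) :=
    fun x => List.map_congr_left (fun a _ => (pv_any_resA T Al x _).symm)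
  rw [hM s, hM r]
  cases hs : Acc.contains s <;> cases hr : Acc.contains r
  case false.true => simp [hs, hr]
  case true.false => simp [hs, hr]
  all_goals {
    simp only [hs, hr, Bool.not_true, Bool.not_false, Bool.and_false, Bool.false_and,
      Bool.true_and, if_false, Bool.false_eq_true, beq_self_eq_true]
    by_cases h : resA T Al s = resA T Al r
    · simp [h]
    · have hb : (resA T Al s == resA T Al r) = false := by simp [h]
      simp only [hb, Bool.false_eq_true, if_false]
      exact pv_all_beq_map _ _ E
  }

-- bucket invariant: every group is nonempty and keyed by the signature of its first element
def pvInv {κ : Type} (f : String → κ) (dB : List (κ × List String)) : Prop :=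
  ∀ p ∈ dB, ∃ r t, p.2 = r :: t ∧ f r = p.1

theorem pv_insert_bucket {κ : Type} [BEq κ] [LawfulBEq κ] (f : String → κ) (s : String) :
    ∀ (dB : List (κ × List String)), pvInv f dB →
      insertA (fun r => f s == f r) s (dB.map Prod.snd) = (bucketB (f s) s dB).map Prod.snd
      ∧ pvInv f (bucketB (f s) s dB) := by
  intro dB
  induction dB with
  | nil =>
    intro _
    constructor
    · rfl
    · intro p hp
      simp [bucketB] at hp
      exact ⟨s, [], by simp [hp]⟩
  | cons hd rest ih =>
    intro hinv
    obtain ⟨k, g⟩ := hd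
    obtain ⟨r, t, hg, hfr⟩ := hinv ⟨k, g⟩ (by simp)
    have hrest : pvInv f rest := fun p hp => hinv p (by simp [hp])
    simp only at hg hfr
    subst hg
    by_cases hk : (f s == f r) = true
    · have hk' : (k == f s) = true := by
        have : f s = f r := by simpa using hk
        simp [← hfr, this]
      constructor
      · simp [bucketB, insertA, hk, hk']
      · intro p hp
        simp only [bucketB, hk', if_true, List.mem_cons] at hp
        rcases hp with h | h
        · exact ⟨r, t ++ [s], by simp [h, hfr]⟩
        · exact hrest p h
    · have hk' : (k == f s) = false := by
        rw [← hfr, beq_eq_false_iff_ne]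
        intro he
        apply hk
        rw [he]
        exact beq_self_eq_true _
      obtain ⟨hmap, hinv'⟩ := ih hrest
      constructor
      · simp [bucketB, insertA, hk, hk', hmap]
      · intro p hp
        simp only [bucketB, hk', Bool.false_eq_true, if_false, List.mem_cons] at hp
        rcases hp with h | h
        · exact ⟨r, t, by simp [h, hfr]⟩
        · exact hinv' p h


theorem pv_fold_insert_bucket {κ : Type} [BEq κ] [LawfulBEq κ] (f : String → κ) :
    ∀ (xs : List String) (dB : List (κ × List String)), pvInv f dB →
      xs.foldl (fun d s => insertA (fun r => f s == f r) s d) (dB.map Prod.snd)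
        = (xs.foldl (fun d s => bucketB (f s) s d) dB).map Prod.snd := by
  intro xs
  induction xs with
  | nil => intro dB _; rfl
  | cons x xs ih =>
    intro dB hinv
    obtain ⟨hmap, hinv'⟩ := pv_insert_bucket f x dB hinv
    simp only [List.foldl_cons, hmap]
    exact ih _ hinv'

-- ===== VERDICT (by name: the statement is the Claim_ definition above) =====
theorem getNEquivalance_spec : Claim_equal_getNEquivalance := by
  intro E states Al T root Acc _ _
  unfold Spec_getNEquivalance getNEquivalance getNEquivalance_alt
  rw [← List.foldl_flatten, ← List.foldl_flatten]
  have hfun : (fun (acc : List (List String)) (s : String) =>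
      insertA (fun r => isEquivA s r E T Al Acc) s acc)
      = (fun acc s => insertA (fun r => sigB E T Al Acc s == sigB E T Al Acc r) s acc) := by
    funext acc s
    congr 1
    funext r
    exact pv_isEquiv_eq_sig s r E T Al Acc
  rw [hfun]
  have := pv_fold_insert_bucket (sigB E T Al Acc) E.flatten [] (by intro p hp; simp at hp)
  simpa using this
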